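-- pv_equiv track=rewrite | github.com/EyeDeck/Advent-of-Code | AoC2021/d18.py | get_explode_index
-- ===== SOURCE A (Python) =====
-- def get_explode_index(fish):
--     ct = 0
--     for i, c in enumerate(fish):
--         if c == ']':
--             ct -= 1
--         if c == '[':
--             ct += 1
--             if ct > 4:
--                 for j, c in enumerate(fish[i:]):
--                     if c == ']':
--                         return i, i + j
--     return -1, -1
-- ===== SOURCE B (Python) =====
-- def get_explode_index(fish):
--     ct = 0
--     start = -1
--     for i, c in enumerate(fish):
--         if c == ']':
--             if start >= 0:
--                 return start, i
--             ct -= 1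
--         elif c == '[':
--             ct += 1
--             if ct > 4 and start < 0:
--                 start = i
--     return -1, -1
-- ===== Notes on version B (the rewrite author's own statement) =====
-- stated objective: simpler
-- what changed: A restarts a nested inner scan over fish[i:] when the depth first exceeds 4; B is a single left-to-right state-machine pass that records the start index and returns at the next closing bracket, with no inner loop or slicing.
import Mathlib
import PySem

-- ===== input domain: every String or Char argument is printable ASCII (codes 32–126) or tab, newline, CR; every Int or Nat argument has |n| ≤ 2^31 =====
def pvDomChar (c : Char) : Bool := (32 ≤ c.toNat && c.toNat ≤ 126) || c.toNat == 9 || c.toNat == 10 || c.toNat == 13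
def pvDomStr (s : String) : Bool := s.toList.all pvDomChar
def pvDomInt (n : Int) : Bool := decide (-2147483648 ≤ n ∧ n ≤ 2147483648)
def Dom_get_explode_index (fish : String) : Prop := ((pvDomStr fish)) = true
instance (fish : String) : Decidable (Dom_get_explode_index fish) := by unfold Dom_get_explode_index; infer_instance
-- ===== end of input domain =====

-- B replaces A's trigger-time inner scan over fish[i:] with a single pass that records the
-- start index and returns at the next ']' (objective: simpler one-pass state machine).

-- ===== PORT A =====
-- inner loop: 'for j, c in enumerate(fish[i:]): if c == ']': return i, i + j'
-- (returns none when the loop falls through, letting the outer loop continue)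
def findClose (i : Int) : Int → List Char → Option (Int × Int)
  | _, [] => none
  | j, c :: rest => if c = ']' then some (i, i + j) else findClose i (j + 1) rest

-- outer loop over enumerate(fish); the suffix 'c :: rest' IS fish[i:] here (i is the current
-- nonnegative position), so passing it to findClose is exact for the slice fish[i:].
def geiA : Int → Int → List Char → Int × Int
  | _, _, [] => (-1, -1)
  | i, ct, c :: rest =>
    let ct1 := if c = ']' then ct - 1 else ct
    if c = '[' then
      let ct2 := ct1 + 1
      if 4 < ct2 then
        match findClose i 0 (c :: rest) with
        | some p => p
        | none => geiA (i + 1) ct2 rest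
      else geiA (i + 1) ct2 rest
    else geiA (i + 1) ct1 rest

def get_explode_index (fish : String) : Int × Int := geiA 0 0 fish.toList

-- ===== PORT B =====
def geiB : Int → Int → Int → List Char → Int × Int
  | _, _, _, [] => (-1, -1)
  | i, ct, start, c :: rest =>
    if c = ']' then
      if 0 ≤ start then (start, i)
      else geiB (i + 1) (ct - 1) start rest
    else if c = '[' then
      let ct' := ct + 1
      geiB (i + 1) ct' (if 4 < ct' ∧ start < 0 then i else start) rest
    else geiB (i + 1) ct start rest

def get_explode_index_alt (fish : String) : Int × Int := geiB 0 0 (-1) fish.toList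

-- ===== PRECONDITION & SPEC =====
def Spec_get_explode_index (fish : String) (out : Int × Int) : Prop := out = get_explode_index_alt fish
instance (fish : String) (out : Int × Int) : Decidable (Spec_get_explode_index fish out) := by unfold Spec_get_explode_index; infer_instance

-- ===== CLAIM (what is proved, stated in full; the proofs are below) =====
def Claim_equal_get_explode_index : Prop := ∀ (fish : String), Dom_get_explode_index fish → Spec_get_explode_index fish (get_explode_index fish)

-- ===== LEMMAS AND PROOFS =====

theorem findClose_none_of_not_mem (l : List Char) (h : ']' ∉ l) (i j : Int) :
    findClose i j l = none := by
  induction l generalizing j with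
  | nil => rfl
  | cons c rest ih =>
    simp only [List.mem_cons, not_or] at h
    have hc : ¬ (c = ']') := fun hc => h.1 hc.symm
    simp only [findClose, if_neg hc]
    exact ih h.2 (j + 1)

theorem not_mem_of_findClose_none (l : List Char) (i j : Int)
    (h : findClose i j l = none) : ']' ∉ l := by
  induction l generalizing j with
  | nil => simp
  | cons c rest ih =>
    by_cases hc : c = ']'
    · simp [findClose, hc] at h
    · simp only [findClose, if_neg hc] at h
      simp only [List.mem_cons, not_or]
      exact ⟨fun he => hc he.symm, ih (j + 1) h⟩

theorem geiA_no_close (l : List Char) (h : ']' ∉ l) (i ct : Int) :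
    geiA i ct l = (-1, -1) := by
  induction l generalizing i ct with
  | nil => rfl
  | cons c rest ih =>
    simp only [List.mem_cons, not_or] at h
    have hc : ¬ (c = ']') := fun hc => h.1 hc.symm
    have hrest : ']' ∉ rest := h.2
    simp only [geiA, if_neg hc]
    by_cases hb : c = '['
    · have hnone : findClose i 0 (c :: rest) = none := by
        apply findClose_none_of_not_mem
        simp only [List.mem_cons, not_or]
        exact ⟨fun he => hc he.symm, hrest⟩
      simp only [if_pos hb, hnone]
      by_cases h4 : 4 < ct + 1 <;> simp [h4, ih hrest]
    · simp only [if_neg hb]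
      exact ih hrest (i + 1) ct

-- B in "seeking" mode (start = s ≥ 0) computes exactly A's inner scan
theorem geiB_seek (l : List Char) (s : Int) (hs : 0 ≤ s) (j ct : Int) :
    geiB (s + j) ct s l = (findClose s j l).getD (-1, -1) := by
  induction l generalizing j ct with
  | nil => rfl
  | cons c rest ih =>
    by_cases hc : c = ']'
    · simp [geiB, findClose, hc, hs]
    · by_cases hb : c = '['
      · have hns : ¬ (4 < ct + 1 ∧ s < 0) := fun ⟨_, h2⟩ => absurd hs (not_le.mpr h2)
        simp only [geiB, findClose, if_neg hc, if_pos hb, if_neg hns]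
        have : s + j + 1 = s + (j + 1) := by ring
        rw [this]; exact ih (j + 1) (ct + 1)
      · simp only [geiB, findClose, if_neg hc, if_neg hb]
        have : s + j + 1 = s + (j + 1) := by ring
        rw [this]; exact ih (j + 1) ct

theorem geiA_eq_geiB (l : List Char) (i ct : Int) (hi : 0 ≤ i) :
    geiA i ct l = geiB i ct (-1) l := by
  induction l generalizing i ct with
  | nil => rfl
  | cons c rest ih =>
    have hi1 : (0 : Int) ≤ i + 1 := by omega
    by_cases hc : c = ']'
    · have hb : ¬ (c = '[') := by rw [hc]; decide
      have hns : ¬ ((0 : Int) ≤ -1) := by decide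
      simp only [geiA, geiB, if_pos hc, if_neg hb, if_neg hns]
      exact ih (i + 1) (ct - 1) hi1
    · by_cases hb : c = '['
      · simp only [geiA, geiB, if_neg hc, if_pos hb]
        by_cases h4 : 4 < ct + 1
        · have hfc : findClose i 0 (c :: rest) = findClose i 1 rest := by
            simp [findClose, hc]
          have hst : (if 4 < ct + 1 ∧ (-1 : Int) < 0 then i else -1) = i := by
            simp [h4]
          rw [hst]
          have hB : geiB (i + 1) (ct + 1) i rest = (findClose i 1 rest).getD (-1, -1) :=
            geiB_seek rest i hi 1 (ct + 1)
          simp only [if_pos h4, hfc, hB]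
          cases hfind : findClose i 1 rest with
          | some p => simp
          | none =>
            simp only [Option.getD_none]
            exact geiA_no_close rest (not_mem_of_findClose_none rest i 1 hfind) (i + 1) (ct + 1)
        · have hst : (if 4 < ct + 1 ∧ (-1 : Int) < 0 then i else -1) = -1 := by
            simp [h4]
          rw [hst]
          simp only [if_neg h4]
          exact ih (i + 1) (ct + 1) hi1
      · simp only [geiA, geiB, if_neg hc, if_neg hb]
        exact ih (i + 1) ct hi1

-- ===== VERDICT (by name: the statement is the Claim_ definition above) =====
theorem get_explode_index_spec : Claim_equal_get_explode_index := by
  intro fish _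
  unfold Spec_get_explode_index get_explode_index get_explode_index_alt
  exact geiA_eq_geiB fish.toList 0 0 (by decide)
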